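-- pv_equiv track=rewrite | github.com/AnamolZ/algovault | Python/HackerRank/getMoneySpent.py | getMoneySpentMergeSort
-- ===== SOURCE A (Python) =====
-- def getMoneySpentMergeSort(k, d, b):
--     """
--     Find the maximum amount of money that can be spent on one keyboard and one drive
--     without exceeding the budget using sorting and the two-pointer technique.
--
--     Parameters:
--     k (list of int): Prices of available keyboards.
--     d (list of int): Prices of available USB drives.
--     b (int): Budget constraint.
--
--     Returns:
--     int: Maximum sum of one keyboard and one drive that does not exceed the budget.
--          Returns -1 if no combination is affordable.
--
--     Notes:
--     - Sorts keyboards in ascending order and drives in descending order.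
--     - Uses a two-pointer traversal to efficiently find the best combination.
--     - Time complexity: O(n log n + m log m), where n = len(k) and m = len(d).
--     - Space complexity: O(n + m) due to merge_sort.
--     """
--     ar_k = merge_sort(k)
--     ar_d = merge_sort(d)[::-1]
--
--     max_spent = -1
--     i = 0
--     j = 0
--
--     while i < len(ar_k) and j < len(ar_d):
--         current_total = ar_k[i] + ar_d[j]
--
--         if current_total <= b:
--             if current_total > max_spent:
--                 max_spent = current_total
--             i += 1
--         else:
--             j += 1
--
--     return max_spent
--
-- def merge_sort(arr):
--     """
--     Sort an array using the merge sort algorithm.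
--
--     Parameters:
--     arr (list of int): List of integers to be sorted.
--
--     Returns:
--     list of int: Sorted list in ascending order.
--
--     Notes:
--     - Merge sort is a divide-and-conquer algorithm.
--     - Time complexity: O(n log n)
--     - Space complexity: O(n)
--     """
--     if len(arr) <= 1:
--         return arr
--
--     mid = len(arr) // 2
--     left = merge_sort(arr[:mid])
--     right = merge_sort(arr[mid:])
--
--     return merge(left, right)
--
-- def merge(left, right):
--     """
--     Merge two sorted lists into a single sorted list.
--
--     Parameters:
--     left (list of int): Sorted list.
--     right (list of int): Sorted list.
--
--     Returns:
--     list of int: Combined sorted list in ascending order.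
--     """
--     result = []
--     i = j = 0
--
--     while i < len(left) and j < len(right):
--         if left[i] <= right[j]:
--             result.append(left[i])
--             i += 1
--         else:
--             result.append(right[j])
--             j += 1
--
--     result.extend(left[i:])
--     result.extend(right[j:])
--
--     return result
-- ===== SOURCE B (Python) =====
-- def getMoneySpentMergeSort(k, d, b):
--     max_spent = -1
--     for x in k:
--         for y in d:
--             s = x + y
--             if s <= b and s > max_spent:
--                 max_spent = s
--     return max_spent
-- ===== Notes on version B (the rewrite author's own statement) =====
-- stated objective: simpler
-- what changed: Replaced the hand-written merge sort plus two-pointer sweep with a plain doubly-nested scan over all keyboard/drive pairs that keeps the running best sum within budget.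
import Mathlib
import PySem

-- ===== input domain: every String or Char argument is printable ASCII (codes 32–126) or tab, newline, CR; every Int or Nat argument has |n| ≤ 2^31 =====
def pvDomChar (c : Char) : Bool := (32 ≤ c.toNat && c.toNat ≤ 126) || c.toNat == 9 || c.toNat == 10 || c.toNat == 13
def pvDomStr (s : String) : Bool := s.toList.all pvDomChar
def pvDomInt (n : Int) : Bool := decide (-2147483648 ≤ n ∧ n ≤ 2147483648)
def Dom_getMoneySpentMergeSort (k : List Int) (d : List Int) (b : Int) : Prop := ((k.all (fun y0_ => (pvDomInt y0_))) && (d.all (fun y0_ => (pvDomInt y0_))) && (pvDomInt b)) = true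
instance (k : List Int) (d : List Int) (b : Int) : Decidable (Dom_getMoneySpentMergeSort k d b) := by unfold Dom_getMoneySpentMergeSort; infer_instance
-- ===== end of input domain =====

-- B replaces A's merge sort + two-pointer sweep with a plain nested scan over all
-- keyboard/drive pairs keeping the running best affordable sum (simpler, not faster).

-- ===== PORT A =====

-- Python `merge(left, right)`: index-based two-way merge, transliterated as the
-- standard structural recursion over the two lists (same comparison `left[i] <= right[j]`,
-- same branch order; `result.extend` tails are the base cases).
def pyMerge : List Int → List Int → List Int
  | [], right => right
  | left, [] => left
  | x :: xs, y :: ys =>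
    if x ≤ y then x :: pyMerge xs (y :: ys) else y :: pyMerge (x :: xs) ys

-- Python `merge_sort(arr)`; `arr[:mid]` / `arr[mid:]` with `mid = len(arr)//2` are
-- exactly `take mid` / `drop mid` (PySem.List.slice_to / slice_from, mid in range).
-- The recursion is run on a fuel counter (`arr.length` always suffices: each half is
-- strictly shorter); the fuel is only a totality guard, the algorithm is unchanged.
def pyMergeSortFuel : Nat → List Int → List Int
  | 0, arr => arr
  | fuel + 1, arr =>
    if arr.length <= 1 then arr
    else
      let mid := arr.length / 2
      pyMerge (pyMergeSortFuel fuel (arr.take mid)) (pyMergeSortFuel fuel (arr.drop mid))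

def pyMergeSort (arr : List Int) : List Int := pyMergeSortFuel arr.length arr

-- the `while i < len(ar_k) and j < len(ar_d)` loop; i, j start at 0 and only grow, so
-- they are kept as Nat and indexing is in range whenever the guard holds.  The loop is
-- run on a fuel counter (`len(ar_k) + len(ar_d)` always suffices: each iteration
-- increments i or j); the fuel is only a totality guard, the loop body is unchanged.
def pyLoopFuel (a ds : List Int) (b : Int) : Nat → Nat → Nat → Int → Int
  | 0, _, _, m => m
  | fuel + 1, i, j, m =>
    if h : i < a.length ∧ j < ds.length then
      have hi : i < a.length := h.1
      have hj : j < ds.length := h.2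
      let cur := a.get ⟨i, hi⟩ + ds.get ⟨j, hj⟩
      if cur <= b then
        pyLoopFuel a ds b fuel (i + 1) j (if cur > m then cur else m)
      else
        pyLoopFuel a ds b fuel i (j + 1) m
    else m

def getMoneySpentMergeSort (k : List Int) (d : List Int) (b : Int) : Int :=
  let ar_k := pyMergeSort k
  let ar_d := (pyMergeSort d).reverse   -- `merge_sort(d)[::-1]`
  pyLoopFuel ar_k ar_d b (ar_k.length + ar_d.length) 0 0 (-1)

-- ===== PORT B =====
def getMoneySpentMergeSort_alt (k : List Int) (d : List Int) (b : Int) : Int :=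
  k.foldl (fun m x =>
    d.foldl (fun m y =>
      if x + y ≤ b ∧ x + y > m then x + y else m) m) (-1)

-- ===== PRECONDITION & SPEC =====
def Spec_getMoneySpentMergeSort (k : List Int) (d : List Int) (b : Int) (out : Int) : Prop := out = getMoneySpentMergeSort_alt k d b
instance (k : List Int) (d : List Int) (b : Int) (out : Int) : Decidable (Spec_getMoneySpentMergeSort k d b out) := by unfold Spec_getMoneySpentMergeSort; infer_instance

-- ===== CLAIM (what is proved, stated in full; the proofs are below) =====
def Claim_equal_getMoneySpentMergeSort : Prop := ∀ (k : List Int) (d : List Int) (b : Int), Dom_getMoneySpentMergeSort k d b → Spec_getMoneySpentMergeSort k d b (getMoneySpentMergeSort k d b)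

-- ===== LEMMAS AND PROOFS =====

-- step function of B's inner loop, and the list of all pair sums
def gstep (b m s : Int) : Int := if s ≤ b ∧ s > m then s else m

def allSums (xs ys : List Int) : List Int :=
  xs.flatMap (fun x => ys.map (fun y => x + y))


theorem gstep_rc : ∀ (m : Int) (s t : Int), gstep b (gstep b m s) t = gstep b (gstep b m t) s := by
  intro m s t; simp only [gstep]; split_ifs <;> omega

-- folding gstep over a list of irrelevant sums (over budget, or not beating m) is the identity
theorem foldl_gstep_skip {b m : Int} {L : List Int}
    (h : ∀ s ∈ L, b < s ∨ s ≤ m) : L.foldl (gstep b) m = m := by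
  induction L with
  | nil => rfl
  | cons s L ih =>
    have hs := h s (by simp)
    have : gstep b m s = m := by simp only [gstep]; split_ifs <;> omega
    simp only [List.foldl_cons, this]
    exact ih (fun t ht => h t (by simp [ht]))

theorem foldl_gstep_perm {b m : Int} {L L' : List Int} (h : L.Perm L') :
    L.foldl (gstep b) m = L'.foldl (gstep b) m :=
  @List.Perm.foldl_eq _ _ (gstep b) _ _ ⟨gstep_rc⟩ h m

theorem allSums_nil_right (xs : List Int) : allSums xs [] = [] := by
  simp [allSums]

theorem allSums_cons_left (x : Int) (xs ys : List Int) :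
    allSums (x :: xs) ys = ys.map (fun y => x + y) ++ allSums xs ys := by
  simp [allSums]

theorem allSums_cons_right_perm (xs : List Int) (y : Int) (ys : List Int) :
    (allSums xs (y :: ys)).Perm (xs.map (fun x => x + y) ++ allSums xs ys) := by
  induction xs with
  | nil => simp [allSums]
  | cons x xs ih =>
    simp only [allSums_cons_left, List.map_cons, List.cons_append]
    refine List.Perm.cons _ ?_
    refine (List.Perm.append_left _ ih).trans ?_
    rw [← List.append_assoc, ← List.append_assoc]
    exact List.Perm.append_right _ List.perm_append_comm

theorem allSums_perm {xs xs' ys ys' : List Int} (hx : xs.Perm xs') (hy : ys.Perm ys') :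
    (allSums xs ys).Perm (allSums xs' ys') :=
  List.Perm.flatMap hx (fun _ _ => hy.map _)

-- members of drops under pairwise orderings
theorem mem_drop_le {l : List Int} (hp : l.Pairwise (· ≤ ·)) {i : Nat} (hi : i < l.length)
    {y : Int} (hy : y ∈ l.drop (i + 1)) : l[i] ≤ y := by
  have h1 : l.drop i = l[i] :: l.drop (i + 1) := List.drop_eq_getElem_cons hi
  have h2 : (l.drop i).Pairwise (· ≤ ·) := hp.drop
  rw [h1, List.pairwise_cons] at h2
  exact h2.1 y hy

theorem mem_drop_ge {l : List Int} (hp : l.Pairwise (· ≥ ·)) {i : Nat} (hi : i < l.length)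
    {y : Int} (hy : y ∈ l.drop (i + 1)) : y ≤ l[i] := by
  have h1 : l.drop i = l[i] :: l.drop (i + 1) := List.drop_eq_getElem_cons hi
  have h2 : (l.drop i).Pairwise (· ≥ ·) := hp.drop
  rw [h1, List.pairwise_cons] at h2
  exact h2.1 y hy

theorem mem_drop_self_le {l : List Int} (hp : l.Pairwise (· ≤ ·)) {i : Nat} (hi : i < l.length)
    {y : Int} (hy : y ∈ l.drop i) : l[i] ≤ y := by
  rw [List.drop_eq_getElem_cons hi] at hy
  rcases hy with _ | hy
  · exact le_refl _
  · exact mem_drop_le hp hi (by assumption)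

-- the two-pointer loop computes the fold of gstep over all remaining pair sums
theorem pyLoop_eq_fold (a ds : List Int) (b : Int)
    (ha : a.Pairwise (· ≤ ·)) (hc : ds.Pairwise (· ≥ ·)) :
    ∀ fuel i j m, (a.length - i) + (ds.length - j) ≤ fuel →
      pyLoopFuel a ds b fuel i j m
        = (allSums (a.drop i) (ds.drop j)).foldl (gstep b) m := by
  intro fuel
  induction fuel with
  | zero =>
    intro i j m hm
    have ha0 : a.drop i = [] := List.drop_eq_nil_of_le (by omega)
    rw [pyLoopFuel, ha0]
    simp [allSums]
  | succ fuel ih =>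
    intro i j m hm
    rw [pyLoopFuel]
    by_cases h : i < a.length ∧ j < ds.length
    · rw [dif_pos h]
      obtain ⟨hi, hj⟩ := h
      set cur := a[i] + ds[j] with hcur
      simp only [List.get_eq_getElem]
      have hda : a.drop i = a[i] :: a.drop (i + 1) := List.drop_eq_getElem_cons hi
      have hdds : ds.drop j = ds[j] :: ds.drop (j + 1) := List.drop_eq_getElem_cons hj
      by_cases hb : cur ≤ b
      · rw [if_pos hb]
        rw [ih _ _ _ (by omega)]
        rw [hda, allSums_cons_left, List.foldl_append, hdds, List.map_cons, List.foldl_cons]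
        have h1 : gstep b m cur = if cur > m then cur else m := by
          simp only [gstep, hb, true_and]
        have hskip :
            ((ds.drop (j + 1)).map (fun y => a[i] + y)).foldl (gstep b) (gstep b m cur)
              = gstep b m cur := by
          refine foldl_gstep_skip (fun s hs => ?_)
          rcases List.mem_map.1 hs with ⟨y, hy, rfl⟩
          have hy' : y ≤ ds[j] := mem_drop_ge hc hj hy
          have hm' : cur ≤ gstep b m cur := by rw [h1]; split_ifs <;> omega
          right; omega
        rw [hskip, h1]
      · rw [if_neg hb]
        rw [ih _ _ _ (by omega)]
        rw [hdds]
        rw [foldl_gstep_perm (allSums_cons_right_perm _ _ _), List.foldl_append]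
        congr 1
        refine (foldl_gstep_skip (fun s hs => ?_)).symm
        rcases List.mem_map.1 hs with ⟨x, hx, rfl⟩
        have hx' : a[i] ≤ x := mem_drop_self_le ha hi hx
        left; omega
    · rw [dif_neg h]
      rcases not_and_or.1 h with hi | hj
      · have ha0 : a.drop i = [] := List.drop_eq_nil_of_le (by omega)
        rw [ha0]; simp [allSums]
      · have hds0 : ds.drop j = [] := List.drop_eq_nil_of_le (by omega)
        rw [hds0, allSums_nil_right]
        rfl

-- B's nested fold is the fold of gstep over all pair sums
theorem alt_fold_aux (d : List Int) (b : Int) :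
    ∀ (k : List Int) (m : Int),
      k.foldl (fun m x => d.foldl (fun m y => if x + y ≤ b ∧ x + y > m then x + y else m) m) m
        = (allSums k d).foldl (gstep b) m := by
  intro k
  induction k with
  | nil => intro m; simp [allSums]
  | cons x xs ih =>
    intro m
    simp only [List.foldl_cons, allSums_cons_left, List.foldl_append, ih]
    congr 1
    rw [List.foldl_map]
    rfl

theorem alt_eq_fold (k d : List Int) (b : Int) :
    getMoneySpentMergeSort_alt k d b = (allSums k d).foldl (gstep b) (-1) := by
  unfold getMoneySpentMergeSort_alt
  exact alt_fold_aux d b k (-1)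

-- merge sort correctness (permutation + sortedness)
theorem pyMerge_perm (l r : List Int) : (pyMerge l r).Perm (l ++ r) := by
  fun_induction pyMerge l r with
  | case1 r => simp
  | case2 => simp
  | case3 x xs y ys hxy ih => exact ih.cons x
  | case4 x xs y ys hxy ih => exact (ih.cons y).trans List.perm_middle.symm

theorem pyMerge_pairwise (l r : List Int) :
    l.Pairwise (· ≤ ·) → r.Pairwise (· ≤ ·) → (pyMerge l r).Pairwise (· ≤ ·) := by
  fun_induction pyMerge l r with
  | case1 r => intro _ hr; exact hr
  | case2 => intro hl _; exact hl
  | case3 x xs y ys hxy ih =>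
    intro hl hr
    rw [List.pairwise_cons] at hl ⊢
    refine ⟨fun z hz => ?_, ih hl.2 hr⟩
    have hz' := (pyMerge_perm xs (y :: ys)).mem_iff.1 hz
    rcases List.mem_append.1 hz' with h | h
    · exact hl.1 z h
    · rcases List.mem_cons.1 h with rfl | h
      · exact hxy
      · exact le_trans hxy ((List.pairwise_cons.1 hr).1 z h)
  | case4 x xs y ys hxy ih =>
    intro hl hr
    rw [List.pairwise_cons] at hr ⊢
    refine ⟨fun z hz => ?_, ih hl hr.2⟩
    have hz' := (pyMerge_perm (x :: xs) ys).mem_iff.1 hz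
    rcases List.mem_append.1 hz' with h | h
    · rcases List.mem_cons.1 h with rfl | h
      · omega
      · exact le_trans (by omega) ((List.pairwise_cons.1 hl).1 z h)
    · exact hr.1 z h

theorem pyMergeSortFuel_perm :
    ∀ (fuel : Nat) (l : List Int), l.length ≤ fuel → (pyMergeSortFuel fuel l).Perm l := by
  intro fuel
  induction fuel with
  | zero => intro l _; exact List.Perm.refl _
  | succ fuel ih =>
    intro l hl
    rw [pyMergeSortFuel]
    split_ifs with h
    · exact List.Perm.refl _
    · have h1 : (l.take (l.length / 2)).length ≤ fuel := by
        simp only [List.length_take]; omega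
      have h2 : (l.drop (l.length / 2)).length ≤ fuel := by
        simp only [List.length_drop]; omega
      refine (pyMerge_perm _ _).trans ?_
      refine ((ih _ h1).append (ih _ h2)).trans ?_
      rw [List.take_append_drop]

theorem pyMergeSortFuel_pairwise :
    ∀ (fuel : Nat) (l : List Int), l.length ≤ fuel →
      (pyMergeSortFuel fuel l).Pairwise (· ≤ ·) := by
  intro fuel
  induction fuel with
  | zero =>
    intro l hl
    have h0 : l = [] := List.length_eq_zero_iff.1 (by omega)
    subst h0; simp [pyMergeSortFuel]
  | succ fuel ih =>
    intro l hl
    rw [pyMergeSortFuel]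
    split_ifs with h
    · match l, h with
      | [], _ => simp
      | [a], _ => simp
    · have h1 : (l.take (l.length / 2)).length ≤ fuel := by
        simp only [List.length_take]; omega
      have h2 : (l.drop (l.length / 2)).length ≤ fuel := by
        simp only [List.length_drop]; omega
      exact pyMerge_pairwise _ _ (ih _ h1) (ih _ h2)

theorem pyMergeSort_perm (l : List Int) : (pyMergeSort l).Perm l :=
  pyMergeSortFuel_perm l.length l le_rfl

theorem pyMergeSort_pairwise (l : List Int) : (pyMergeSort l).Pairwise (· ≤ ·) :=
  pyMergeSortFuel_pairwise l.length l le_rfl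

-- ===== VERDICT (by name: the statement is the Claim_ definition above) =====
theorem getMoneySpentMergeSort_spec : Claim_equal_getMoneySpentMergeSort := by
  intro k d b _
  unfold Spec_getMoneySpentMergeSort getMoneySpentMergeSort
  have ha := pyMergeSort_pairwise k
  have hc : ((pyMergeSort d).reverse).Pairwise (· ≥ ·) :=
    List.pairwise_reverse.2 (by simpa using pyMergeSort_pairwise d)
  rw [pyLoop_eq_fold _ _ _ ha hc _ 0 0 (-1) (by simp)]
  simp only [List.drop_zero]
  rw [alt_eq_fold]
  exact foldl_gstep_perm
    (allSums_perm (pyMergeSort_perm k) (((pyMergeSort d).reverse_perm).trans (pyMergeSort_perm d)))
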